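-- pv_equiv track=rewrite | github.com/niloysh/5g-traffic-generator | anomalies/inject_persistent_queue.py | group_teids_by_qid
-- ===== SOURCE A (Python) =====
-- QID_PERSISTENT_THRESHOLDS = {
--     0: {"pps": 200_000, "duration_range": (1.0, 5.0)},
--     1: {"pps": 1_000_000, "duration_range": (3.0, 7.0)},
--     2: {"pps": 150_000, "duration_range": (2.0, 6.0)},
--     3: {"pps": 800_000, "duration_range": (2.0, 6.0)},
-- }
--
-- def group_teids_by_qid(teid_map):
--     qid_groups = {qid: [] for qid in QID_PERSISTENT_THRESHOLDS.keys()}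
--     for teid_hex, entry in teid_map.items():
--         qfi = entry["qfi"]
--         if qfi == 1:
--             qid = 0
--         elif qfi == 2:
--             qid = 1
--         elif qfi == 3:
--             qid = 2
--         elif qfi == 5:
--             qid = 3
--         else:
--             continue
--         qid_groups[qid].append((teid_hex, entry["qfi"]))
--     return qid_groups
-- ===== SOURCE B (Python) =====
-- QID_PERSISTENT_THRESHOLDS = {
--     0: {"pps": 200_000, "duration_range": (1.0, 5.0)},
--     1: {"pps": 1_000_000, "duration_range": (3.0, 7.0)},
--     2: {"pps": 150_000, "duration_range": (2.0, 6.0)},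
--     3: {"pps": 800_000, "duration_range": (2.0, 6.0)},
-- }
--
-- # reverse mapping: which qfi feeds each persistent queue id
-- QID_TO_QFI = {0: 1, 1: 2, 2: 3, 3: 5}
--
--
-- def group_teids_by_qid(teid_map):
--     return {
--         qid: [(teid_hex, entry["qfi"]) for teid_hex, entry in teid_map.items()
--               if entry["qfi"] == qfi]
--         for qid, qfi in QID_TO_QFI.items()
--     }
-- ===== Notes on version B (the rewrite author's own statement) =====
-- stated objective: simpler
-- what changed: Replaces A's single stateful pass (mutable per-qid buckets filled via a qfi branch chain) with a reverse map qid->qfi and one dict comprehension that, for each qid, filters teid_map for entries with that qfi; same keys 0-3 and same per-group insertion order.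
import Mathlib
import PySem

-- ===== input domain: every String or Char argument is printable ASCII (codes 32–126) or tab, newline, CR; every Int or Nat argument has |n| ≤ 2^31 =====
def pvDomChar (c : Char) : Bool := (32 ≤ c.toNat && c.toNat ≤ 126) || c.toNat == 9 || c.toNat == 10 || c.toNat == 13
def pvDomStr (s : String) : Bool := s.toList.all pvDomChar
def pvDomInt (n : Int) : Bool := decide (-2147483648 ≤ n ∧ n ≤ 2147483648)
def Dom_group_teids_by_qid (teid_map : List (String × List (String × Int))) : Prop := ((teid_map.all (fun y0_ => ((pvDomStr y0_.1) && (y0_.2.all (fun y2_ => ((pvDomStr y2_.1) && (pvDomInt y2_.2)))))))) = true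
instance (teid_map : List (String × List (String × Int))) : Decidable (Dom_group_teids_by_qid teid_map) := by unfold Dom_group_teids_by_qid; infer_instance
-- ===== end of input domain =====

-- B replaces A's single stateful bucket-filling pass by a reverse qid→qfi map and one
-- filtering comprehension per qid (objective: simpler decomposition, same O(n) cost).
-- QID_PERSISTENT_THRESHOLDS is only used for its keys [0,1,2,3]; its float payloads are
-- never read by the function, so the ports carry only the key list.

-- ===== PORT A =====
-- loop body of A: look up entry["qfi"] (KeyError → excluded by Pre_), map qfi to a qid
-- via the branch chain, append (teid_hex, qfi) to that qid's bucket
def pvStepA (qid_groups : PySem.Dict Int (List (String × Int)))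
    (p : String × List (String × Int)) : PySem.Dict Int (List (String × Int)) :=
  match (PySem.Dict.mk p.2).get? "qfi" with
  | none => qid_groups   -- Python raises KeyError here; such inputs are outside Pre_
  | some qfi =>
    if qfi == 1 then qid_groups.modify 0 [] (· ++ [(p.1, qfi)])
    else if qfi == 2 then qid_groups.modify 1 [] (· ++ [(p.1, qfi)])
    else if qfi == 3 then qid_groups.modify 2 [] (· ++ [(p.1, qfi)])
    else if qfi == 5 then qid_groups.modify 3 [] (· ++ [(p.1, qfi)])
    else qid_groups

def group_teids_by_qid (teid_map : List (String × List (String × Int))) : List (Int × List (String × Int)) :=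
  (teid_map.foldl pvStepA
    (([0, 1, 2, 3] : List Int).foldl (fun d q => d.insert q ([] : List (String × Int))) PySem.Dict.empty)).items

-- ===== PORT B =====
-- inner comprehension of B: the entries of teid_map whose "qfi" is q, in order
def pvGroupB (q : Int) (teid_map : List (String × List (String × Int))) : List (String × Int) :=
  teid_map.filterMap (fun p =>
    match (PySem.Dict.mk p.2).get? "qfi" with
    | some v => if v == q then some (p.1, v) else none
    | none => none)   -- Python raises KeyError here; such inputs are outside Pre_

def group_teids_by_qid_alt (teid_map : List (String × List (String × Int))) : List (Int × List (String × Int)) :=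
  ([((0 : Int), (1 : Int)), (1, 2), (2, 3), (3, 5)]).map (fun qp => (qp.1, pvGroupB qp.2 teid_map))

-- ===== PRECONDITION & SPEC =====
-- Pre_ excludes exactly the inputs where some entry lacks the "qfi" key: there Python A
-- (and B alike) raises KeyError.
def Pre_group_teids_by_qid (teid_map : List (String × List (String × Int))) : Prop :=
  (teid_map.all (fun p => p.2.any (fun kv => kv.1 == "qfi"))) = true
instance (teid_map : List (String × List (String × Int))) : Decidable (Pre_group_teids_by_qid teid_map) := by unfold Pre_group_teids_by_qid; infer_instance

def pvWitness_group_teids_by_qid : (List (String × List (String × Int))) :=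
  [("ab12", [("qfi", 1)]), ("cd34", [("qfi", 7)])]

def Spec_group_teids_by_qid (teid_map : List (String × List (String × Int))) (out : List (Int × List (String × Int))) : Prop := out = group_teids_by_qid_alt teid_map
instance (teid_map : List (String × List (String × Int))) (out : List (Int × List (String × Int))) : Decidable (Spec_group_teids_by_qid teid_map out) := by unfold Spec_group_teids_by_qid; infer_instance

-- ===== CLAIM (what is proved, stated in full; the proofs are below) =====
def Claim_equal_group_teids_by_qid : Prop := ∀ (teid_map : List (String × List (String × Int))), Dom_group_teids_by_qid teid_map → Pre_group_teids_by_qid teid_map → Spec_group_teids_by_qid teid_map (group_teids_by_qid teid_map)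

-- ===== LEMMAS AND PROOFS =====

-- A's loop, started from any four buckets, appends exactly B's filtered groups.
lemma pv_loopA (ms : List (String × List (String × Int))) :
    ∀ l0 l1 l2 l3 : List (String × Int),
      ms.foldl pvStepA (PySem.Dict.mk [((0 : Int), l0), (1, l1), (2, l2), (3, l3)])
        = PySem.Dict.mk [(0, l0 ++ pvGroupB 1 ms), (1, l1 ++ pvGroupB 2 ms),
                         (2, l2 ++ pvGroupB 3 ms), (3, l3 ++ pvGroupB 5 ms)] := by
  induction ms with
  | nil => intro l0 l1 l2 l3; simp [pvGroupB]
  | cons p ms ih =>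
    intro l0 l1 l2 l3
    simp only [List.foldl_cons]
    rcases h : (PySem.Dict.mk p.2).get? "qfi" with _ | v
    · simp only [pvStepA, h]
      rw [ih]
      simp [pvGroupB, h]
    · simp only [pvStepA, h]
      by_cases h1 : v = 1
      · subst h1
        simp only [beq_self_eq_true, Bool.false_eq_true, if_true, if_false]
        rw [show (PySem.Dict.mk [((0 : Int), l0), (1, l1), (2, l2), (3, l3)]).modify 0 []
              (· ++ [(p.1, (1 : Int))]) = PySem.Dict.mk [(0, l0 ++ [(p.1, 1)]), (1, l1), (2, l2), (3, l3)] by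
            simp [PySem.Dict.modify, PySem.Dict.contains, PySem.Dict.insert, PySem.Dict.getD, PySem.Dict.get?]]
        rw [ih]
        simp [pvGroupB, h]
      · by_cases h2 : v = 2
        · subst h2
          simp only [show ((2 : Int) == 1) = false by decide, beq_self_eq_true, Bool.false_eq_true, if_true, if_false]
          rw [show (PySem.Dict.mk [((0 : Int), l0), (1, l1), (2, l2), (3, l3)]).modify 1 []
                (· ++ [(p.1, (2 : Int))]) = PySem.Dict.mk [(0, l0), (1, l1 ++ [(p.1, 2)]), (2, l2), (3, l3)] by
              simp [PySem.Dict.modify, PySem.Dict.contains, PySem.Dict.insert, PySem.Dict.getD, PySem.Dict.get?]]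
          rw [ih]
          simp [pvGroupB, h]
        · by_cases h3 : v = 3
          · subst h3
            simp only [show ((3 : Int) == 1) = false by decide, show ((3 : Int) == 2) = false by decide,
              beq_self_eq_true, Bool.false_eq_true, if_true, if_false]
            rw [show (PySem.Dict.mk [((0 : Int), l0), (1, l1), (2, l2), (3, l3)]).modify 2 []
                  (· ++ [(p.1, (3 : Int))]) = PySem.Dict.mk [(0, l0), (1, l1), (2, l2 ++ [(p.1, 3)]), (3, l3)] by
                simp [PySem.Dict.modify, PySem.Dict.contains, PySem.Dict.insert, PySem.Dict.getD, PySem.Dict.get?]]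
            rw [ih]
            simp [pvGroupB, h]
          · by_cases h5 : v = 5
            · subst h5
              simp only [show ((5 : Int) == 1) = false by decide, show ((5 : Int) == 2) = false by decide,
                show ((5 : Int) == 3) = false by decide, beq_self_eq_true, Bool.false_eq_true, if_true, if_false]
              rw [show (PySem.Dict.mk [((0 : Int), l0), (1, l1), (2, l2), (3, l3)]).modify 3 []
                    (· ++ [(p.1, (5 : Int))]) = PySem.Dict.mk [(0, l0), (1, l1), (2, l2), (3, l3 ++ [(p.1, 5)])] by
                  simp [PySem.Dict.modify, PySem.Dict.contains, PySem.Dict.insert, PySem.Dict.getD, PySem.Dict.get?]]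
              rw [ih]
              simp [pvGroupB, h]
            · have e1 : (v == 1) = false := by simp [h1]
              have e2 : (v == 2) = false := by simp [h2]
              have e3 : (v == 3) = false := by simp [h3]
              have e5 : (v == 5) = false := by simp [h5]
              simp only [e1, e2, e3, e5, Bool.false_eq_true, if_false]
              rw [ih]
              simp [pvGroupB, List.filterMap_cons, h, h1, h2, h3, h5]

lemma pv_init :
    (([0, 1, 2, 3] : List Int).foldl (fun d q => d.insert q ([] : List (String × Int))) PySem.Dict.empty)
      = PySem.Dict.mk [(0, []), (1, []), (2, []), (3, [])] := by
  decide

-- ===== VERDICT (by name: the statement is the Claim_ definition above) =====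
theorem group_teids_by_qid_spec : Claim_equal_group_teids_by_qid := by
  intro teid_map _ _
  unfold Spec_group_teids_by_qid group_teids_by_qid group_teids_by_qid_alt
  rw [pv_init, pv_loopA]
  simp
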